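-- pv_equiv track=rewrite | github.com/Havcker243/Recursive-Agent-Framework- | raf/agents/consortium.py | mode_decision_early_exit
-- ===== SOURCE A (Python) =====
-- from collections import Counter
-- from typing import Any, Callable, Dict, List, Optional, Union
--
-- def mode_decision_early_exit(results: List[Dict[str, Any]]) -> bool:
--     """Early-exit function for mode_decision consortiums.
--
--     Returns True (stop collecting) when a strict majority of received results
--     agree on the same mode.  With 3 agents this fires as soon as 2 agree —
--     the fastest two models short-circuit the wait for the slowest.
--
--     Only used for mode_decision because it is a binary choice (base/recursive)
--     where two agreeing agents are highly reliable.  Plan and base_execute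
--     benefit from full proposal diversity and should NOT use early exit.
--     """
--     if len(results) < 2:
--         return False  # need at least 2 results before making a majority call
--     counts = Counter(r.get("mode") for r in results if r.get("mode"))
--     if not counts:
--         return False
--     top_count = counts.most_common(1)[0][1]
--     majority = len(results) // 2 + 1  # strict majority of results so far
--     return top_count >= majority
-- ===== SOURCE B (Python) =====
-- from typing import Any, Dict, List
--
--
-- def mode_decision_early_exit(results: List[Dict[str, Any]]) -> bool:
--     """Boyer-Moore majority vote: one streaming pass keeps a single candidate
--     and a counter, then one counting pass verifies the strict majority."""
--     if len(results) < 2: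
--         return False
--     candidate = None
--     count = 0
--     for r in results:
--         m = r.get("mode")
--         if not m:
--             continue
--         if count == 0:
--             candidate = m
--             count = 1
--         elif m == candidate:
--             count += 1
--         else:
--             count -= 1
--     if candidate is None:
--         return False  # no valid mode seen at all
--     occ = 0
--     for r in results:
--         if r.get("mode") == candidate:
--             occ += 1
--     return occ >= len(results) // 2 + 1
-- ===== Notes on version B (the rewrite author's own statement) =====
-- stated objective: alternative
-- what changed: Replaces building a Counter over all modes and taking most_common(1) with a Boyer-Moore majority vote: one streaming pass maintaining a single candidate and counter, then one verification pass counting the candidate against the strict-majority threshold (O(1) extra space instead of a hash table).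
import Mathlib
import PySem

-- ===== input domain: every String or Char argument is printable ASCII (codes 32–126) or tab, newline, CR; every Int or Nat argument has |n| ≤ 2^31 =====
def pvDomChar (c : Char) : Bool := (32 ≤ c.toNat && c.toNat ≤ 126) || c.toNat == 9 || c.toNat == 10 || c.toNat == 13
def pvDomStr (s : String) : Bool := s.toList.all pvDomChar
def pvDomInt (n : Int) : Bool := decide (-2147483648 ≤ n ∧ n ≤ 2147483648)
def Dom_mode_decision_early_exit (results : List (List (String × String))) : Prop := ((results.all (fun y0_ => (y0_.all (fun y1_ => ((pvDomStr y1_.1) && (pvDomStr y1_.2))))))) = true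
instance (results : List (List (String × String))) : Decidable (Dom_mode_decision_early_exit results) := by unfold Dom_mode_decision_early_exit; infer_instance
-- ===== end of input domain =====

-- B replaces A's Counter + most_common(1) with a Boyer–Moore majority vote
-- (candidate/counter pass, then a verification count): an alternative algorithm
-- with O(1) extra space; return-value equivalence is proved for all inputs.


-- ===== PORT A =====
-- r.get("mode")
def pvGetMode (r : List (String × String)) : Option String :=
  PySem.Dict.get? (PySem.Dict.mk r) "mode"

-- the generator `r.get("mode") for r in results if r.get("mode")` — keeps only truthy (non-empty) modes
def pvValidMode (r : List (String × String)) : Option String :=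
  match pvGetMode r with
  | some s => if s = "" then none else some s
  | none => none

def mode_decision_early_exit (results : List (List (String × String))) : Bool :=
  if results.length < 2 then false
  else
    let counts := PySem.Dict.counter (results.filterMap pvValidMode)
    if counts.items = [] then false
    else
      -- counts.most_common(1)[0][1]: the (first) maximal count among the items
      match PySem.List.max? counts.items (fun p => p.2) with
      | none => false  -- unreachable: counts.items ≠ []
      | some p =>
        let majority : Int := PySem.Int.floordiv (results.length : Int) 2 + 1
        decide (p.2 ≥ majority)

-- ===== PORT B =====
-- one Boyer–Moore step on the (candidate, count) state
def bmStep (st : Option String × Int) (m : String) : Option String × Int :=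
  if st.2 = 0 then (some m, 1)
  else if st.1 = some m then (st.1, st.2 + 1)
  else (st.1, st.2 - 1)

def mode_decision_early_exit_alt (results : List (List (String × String))) : Bool :=
  if results.length < 2 then false
  else
    let st := results.foldl (fun st r =>
      match pvValidMode r with
      | some m => bmStep st m
      | none => st) (none, 0)
    match st.1 with
    | none => false  -- no valid mode seen at all
    | some c =>
      let occ := results.foldl (fun n r => if pvGetMode r = some c then n + 1 else n) (0 : Int)
      decide (occ ≥ PySem.Int.floordiv (results.length : Int) 2 + 1)

-- ===== PRECONDITION & SPEC =====
def Spec_mode_decision_early_exit (results : List (List (String × String))) (out : Bool) : Prop := out = mode_decision_early_exit_alt results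
instance (results : List (List (String × String))) (out : Bool) : Decidable (Spec_mode_decision_early_exit results out) := by unfold Spec_mode_decision_early_exit; infer_instance

-- ===== CLAIM (what is proved, stated in full; the proofs are below) =====
def Claim_equal_mode_decision_early_exit : Prop := ∀ (results : List (List (String × String))), Dom_mode_decision_early_exit results → Spec_mode_decision_early_exit results (mode_decision_early_exit results)

-- ===== LEMMAS AND PROOFS =====

-- B's skip-none fold over results is the fold of bmStep over the filtered modes list
lemma foldl_skip_none (l : List (List (String × String))) (init : Option String × Int) :
    l.foldl (fun st r => match pvValidMode r with | some m => bmStep st m | none => st) init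
      = (l.filterMap pvValidMode).foldl bmStep init := by
  induction l generalizing init with
  | nil => rfl
  | cons r t ih =>
    simp only [List.foldl_cons, List.filterMap_cons]
    cases h : pvValidMode r <;> simp [ih]

-- the Boyer–Moore candidate is the initial one or an element of the list
lemma bm_cand_mem (l : List String) (st : Option String × Int) :
    (l.foldl bmStep st).1 = st.1 ∨ ∃ m ∈ l, (l.foldl bmStep st).1 = some m := by
  induction l generalizing st with
  | nil => exact Or.inl rfl
  | cons x t ih =>
    simp only [List.foldl_cons]
    rcases ih (bmStep st x) with h | ⟨m, hm, h⟩
    · by_cases h0 : st.2 = 0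
      · refine Or.inr ⟨x, List.mem_cons_self, ?_⟩
        rw [h]; simp [bmStep, h0]
      · by_cases h1 : st.1 = some x
        · refine Or.inl ?_; rw [h]; simp [bmStep, h0, h1]
        · refine Or.inl ?_; rw [h]; simp [bmStep, h0, h1]
    · exact Or.inr ⟨m, List.mem_cons_of_mem _ hm, h⟩

-- core Boyer–Moore fact: a strict-majority element ends up as the candidate
lemma bm_majority (l : List String) : ∀ (c : Option String) (k : Int) (m : String),
    0 ≤ k →
    2 * ((l.count m : Int) + (if c = some m then k else 0)) > (l.length : Int) + k →
    (l.foldl bmStep (c, k)).1 = some m := by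
  induction l with
  | nil =>
    intro c k m hk h
    simp only [List.count_nil, List.length_nil, Nat.cast_zero, zero_add] at h
    by_cases hc : c = some m
    · simpa using hc
    · rw [if_neg hc] at h; omega
  | cons x t ih =>
    intro c k m hk h
    simp only [List.length_cons, Nat.cast_add, Nat.cast_one] at h
    simp only [List.foldl_cons]
    by_cases hx : x = m
    · have hcnt : ((x :: t).count m : Int) = (t.count m : Int) + 1 := by
        rw [hx, List.count_cons_self]; push_cast; ring
      rw [hcnt] at h
      by_cases h0 : k = 0
      · rw [show bmStep (c, k) x = (some x, 1) from by simp [bmStep, h0]]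
        apply ih (some x) 1 m (by norm_num)
        rw [if_pos (by rw [hx])]
        have hif : (if c = some m then k else 0) = 0 := by split <;> omega
        rw [hif] at h; omega
      · by_cases h1 : c = some x
        · rw [show bmStep (c, k) x = (c, k + 1) from by simp [bmStep, h0, h1]]
          apply ih c (k + 1) m (by omega)
          have hc : c = some m := by rw [h1, hx]
          rw [if_pos hc] at h ⊢; omega
        · rw [show bmStep (c, k) x = (c, k - 1) from by simp [bmStep, h0, h1]]
          apply ih c (k - 1) m (by omega)
          have hc : ¬ c = some m := by rw [← hx]; simpa using h1
          rw [if_neg hc] at h ⊢; omega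
    · have hcnt : ((x :: t).count m : Int) = (t.count m : Int) := by
        simp [hx]
      rw [hcnt] at h
      by_cases h0 : k = 0
      · rw [show bmStep (c, k) x = (some x, 1) from by simp [bmStep, h0]]
        apply ih (some x) 1 m (by norm_num)
        rw [if_neg (by simpa using hx)]
        have hif : (if c = some m then k else 0) = 0 := by split <;> omega
        rw [hif] at h; omega
      · by_cases h1 : c = some x
        · rw [show bmStep (c, k) x = (c, k + 1) from by simp [bmStep, h0, h1]]
          apply ih c (k + 1) m (by omega)
          have hc : ¬ c = some m := by rw [h1]; simpa using hx
          rw [if_neg hc] at h ⊢; omega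
        · rw [show bmStep (c, k) x = (c, k - 1) from by simp [bmStep, h0, h1]]
          apply ih c (k - 1) m (by omega)
          rcases em (c = some m) with hc | hc
          · rw [if_pos hc] at h ⊢; omega
          · rw [if_neg hc] at h ⊢; omega

-- a valid mode is never the empty string
lemma validMode_ne_empty {r : List (String × String)} {s : String}
    (h : pvValidMode r = some s) : s ≠ "" := by
  intro hs; subst hs
  unfold pvValidMode at h
  cases hg : pvGetMode r <;> rw [hg] at h <;> simp at h

-- for a non-empty candidate, B's verification test matches the filtered extraction
lemma getMode_eq_valid (r : List (String × String)) (c : String) (hc : c ≠ "") :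
    (pvGetMode r = some c) ↔ (pvValidMode r = some c) := by
  unfold pvValidMode
  cases hg : pvGetMode r with
  | none => simp
  | some v =>
    simp only [Option.some.injEq]
    by_cases hv : v = ""
    · subst hv; simp [Ne.symm hc]
    · simp [hv]

-- B's second pass computes the count of the candidate among the valid modes
lemma occ_eq_count (results : List (List (String × String))) (c : String) (hc : c ≠ "") :
    results.foldl (fun n r => if pvGetMode r = some c then n + 1 else n) (0 : Int)
      = ((results.filterMap pvValidMode).count c : Int) := by
  rw [List.count_filterMap]
  induction results using List.reverseRecOn with
  | nil => rfl
  | append_singleton t r ih =>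
    rw [List.foldl_append, List.countP_append, ih]
    by_cases h : pvGetMode r = some c
    · simp [List.foldl, h, (getMode_eq_valid r c hc).mp h]
    · have hv : ¬ (pvValidMode r = some c) := fun hvv => h ((getMode_eq_valid r c hc).mpr hvv)
      simp [List.foldl, h, hv]

-- ===== VERDICT (by name: the statement is the Claim_ definition above) =====
theorem mode_decision_early_exit_spec : Claim_equal_mode_decision_early_exit := by
  intro results _
  unfold Spec_mode_decision_early_exit
  by_cases hn : results.length < 2
  · simp [mode_decision_early_exit, mode_decision_early_exit_alt, hn]
  · have hmaj2 : 2 * (PySem.Int.floordiv (results.length : Int) 2 + 1) > (results.length : Int) := by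
      rw [PySem.Int.floordiv_eq_ediv_of_pos (by norm_num)]
      omega
    have hlen : (results.filterMap pvValidMode).length ≤ results.length :=
      List.length_filterMap_le _ _
    unfold mode_decision_early_exit mode_decision_early_exit_alt
    rw [if_neg hn, if_neg hn, foldl_skip_none]
    cases hm : results.filterMap pvValidMode with
    | nil => simp [PySem.Dict.items_counter, PySem.Set.ofList]
    | cons x t =>
      rw [hm] at hlen
      have hne : (PySem.Dict.counter (x :: t)).items ≠ [] := by
        rw [PySem.Dict.items_counter]
        intro hemp
        have hxmem : x ∈ PySem.Set.ofList (x :: t) :=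
          (PySem.Set.mem_ofList _ _).mpr List.mem_cons_self
        rw [List.map_eq_nil_iff.mp hemp] at hxmem
        simp at hxmem
      rw [if_neg hne]
      have hcand : ∃ c, ((x :: t).foldl bmStep (none, 0)).1 = some c ∧ c ∈ x :: t := by
        rw [List.foldl_cons, show bmStep (none, 0) x = (some x, 1) from by simp [bmStep]]
        rcases bm_cand_mem t (some x, 1) with h | ⟨m', hm', h⟩
        · exact ⟨x, h, List.mem_cons_self⟩
        · exact ⟨m', h, List.mem_cons_of_mem _ hm'⟩
      rcases hcand with ⟨c, hc, hcm⟩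
      have hcne : c ≠ "" := by
        have : c ∈ results.filterMap pvValidMode := hm ▸ hcm
        rcases List.mem_filterMap.mp this with ⟨r, _, hr⟩
        exact validMode_ne_empty hr
      simp only [hc]
      rw [occ_eq_count results c hcne, hm]
      cases hmax : PySem.List.max? (PySem.Dict.counter (x :: t)).items (fun p => p.2) with
      | none => exact absurd ((PySem.List.max?_eq_none_iff _ _).mp hmax) hne
      | some p =>
        show decide (p.2 ≥ PySem.Int.floordiv (results.length : Int) 2 + 1)
              = decide (((x :: t).count c : Int) ≥ PySem.Int.floordiv (results.length : Int) 2 + 1)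
        have hpmem := PySem.List.max?_mem hmax
        have hpmax := PySem.List.max?_isMax hmax
        rw [PySem.Dict.items_counter] at hpmem
        rcases List.mem_map.mp hpmem with ⟨k, hk, hkp⟩
        have hp2 : p.2 = ((x :: t).count k : Int) := by rw [← hkp]
        by_cases htop : p.2 ≥ PySem.Int.floordiv (results.length : Int) 2 + 1
        · have hcount : (((x :: t).count k : Int)) ≥ PySem.Int.floordiv (results.length : Int) 2 + 1 :=
            hp2 ▸ htop
          have hbm : ((x :: t).foldl bmStep (none, 0)).1 = some k := by
            apply bm_majority (x :: t) none 0 k le_rfl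
            rw [if_neg (by simp)]
            push_cast at hlen hcount ⊢
            omega
          have hck : c = k := Option.some.inj (hc ▸ hbm)
          rw [hck, hp2]
        · have hcc : ((c, ((x :: t).count c : Int)) ∈ (PySem.Dict.counter (x :: t)).items) := by
            rw [PySem.Dict.items_counter]
            exact List.mem_map.mpr ⟨c, (PySem.Set.mem_ofList _ _).mpr hcm, rfl⟩
          have hle := hpmax _ hcc
          simp only [] at hle
          have hcfail : ¬ (((x :: t).count c : Int) ≥ PySem.Int.floordiv (results.length : Int) 2 + 1) := by
            omega
          rw [decide_eq_false htop, decide_eq_false hcfail]
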